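-- pv_equiv track=rewrite | github.com/tahmid-bhuiyan/100-Days-of-Code | BasicProjects/Loops&Lists.py | how_odd
-- ===== SOURCE A (Python) =====
-- def how_odd(n):
-- #declares variable x equal to 0
-- 	x = 0
-- #if there is no remainder, execute
-- 	if n % 2 == 0:
-- 		return x
-- #if there is remainder, execute
-- 	while n % 2 != 0:
-- #n is divded by 2
-- 		n = int(n/2)
-- #x increased by 1 according to pattern
-- 		x += 1
-- #if no remainder, execute
-- 		if n % 2 == 0:
-- 			return x
-- ===== SOURCE B (Python) =====
-- def how_odd(n):
--     # Closed form: the loop counts the trailing 1-bits of abs(n)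
--     # (int(n/2) truncates toward zero, so negatives mirror positives).
--     b = bin(abs(n))[2:]
--     return len(b) - len(b.rstrip('1'))
-- ===== Notes on version B (the rewrite author's own statement) =====
-- stated objective: simpler
-- what changed: Replaces the halving loop with a closed form: build the binary representation of abs(n) once and count its trailing '1' characters (len minus len after rstrip('1')).
import Mathlib
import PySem

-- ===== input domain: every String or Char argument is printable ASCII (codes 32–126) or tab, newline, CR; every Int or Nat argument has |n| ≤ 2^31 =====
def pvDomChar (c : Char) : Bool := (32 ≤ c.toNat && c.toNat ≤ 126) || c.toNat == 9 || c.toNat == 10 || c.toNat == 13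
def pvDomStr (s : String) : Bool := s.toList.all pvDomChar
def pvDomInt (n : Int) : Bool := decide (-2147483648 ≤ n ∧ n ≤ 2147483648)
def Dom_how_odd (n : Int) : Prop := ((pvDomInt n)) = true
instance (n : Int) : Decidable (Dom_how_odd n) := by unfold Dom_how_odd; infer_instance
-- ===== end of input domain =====

-- B replaces A's halving loop by a closed form: binary representation of abs(n), count trailing '1's (objective: simpler).


-- ===== PORT A =====
-- the while loop; called only with n odd, so the loop-exit branch (Python would fall off
-- the function end) is unreachable and returns x.
def howOddLoop (n x : Int) : Int :=
  if PySem.Int.mod n 2 ≠ 0 then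
    let n2 := PySem.Int.truncdiv n 2      -- n = int(n/2)
    let x2 := x + 1                       -- x += 1
    if PySem.Int.mod n2 2 = 0 then x2
    else howOddLoop n2 x2
  else x
termination_by n.natAbs
decreasing_by
  have h2 : (PySem.Int.truncdiv n 2).natAbs = n.natAbs / 2 := by
    simp [PySem.Int.truncdiv, Int.natAbs_tdiv]; rfl
  have hn : n ≠ 0 := by rintro rfl; simp [PySem.Int.mod] at *
  have : n.natAbs ≠ 0 := Int.natAbs_ne_zero.mpr hn
  omega

def how_odd (n : Int) : Int :=
  let x : Int := 0
  if PySem.Int.mod n 2 = 0 then x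
  else howOddLoop n x

-- ===== PORT B =====
-- bin(k)[2:] for k > 0, MSB first (exact: Python's bin on a positive int)
def binChars (k : Nat) : List Char :=
  if k = 0 then [] else binChars (k / 2) ++ [if k % 2 = 1 then '1' else '0']

def how_odd_alt (n : Int) : Int :=
  let b : List Char := if n.natAbs = 0 then ['0'] else binChars n.natAbs  -- bin(abs(n))[2:]
  let s : List Char := (b.reverse.dropWhile (· == '1')).reverse           -- b.rstrip('1'), exact
  (b.length : Int) - (s.length : Int)

-- ===== PRECONDITION & SPEC =====
def Spec_how_odd (n : Int) (out : Int) : Prop := out = how_odd_alt n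
instance (n : Int) (out : Int) : Decidable (Spec_how_odd n out) := by unfold Spec_how_odd; infer_instance

-- ===== CLAIM (what is proved, stated in full; the proofs are below) =====
def Claim_equal_how_odd : Prop := ∀ (n : Int), Dom_how_odd n → Spec_how_odd n (how_odd n)

-- ===== LEMMAS AND PROOFS =====

-- number of trailing 1-bits of k
def trailOnes (k : Nat) : Nat :=
  if k % 2 = 1 then trailOnes (k / 2) + 1 else 0
decreasing_by omega

theorem trailOnes_odd (k : Nat) (h : k % 2 = 1) : trailOnes k = trailOnes (k / 2) + 1 := by
  rw [trailOnes.eq_def]; simp [h]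

theorem trailOnes_even (k : Nat) (h : k % 2 = 0) : trailOnes k = 0 := by
  rw [trailOnes.eq_def]; simp [h]

theorem binChars_reverse_takeWhile (k : Nat) :
    ((binChars k).reverse.takeWhile (· == '1')).length = trailOnes k := by
  induction k using Nat.strong_induction_on with
  | _ k ih =>
    rw [binChars.eq_def, trailOnes.eq_def]
    by_cases hk : k = 0
    · simp [hk]
    · by_cases ho : k % 2 = 1 <;>
        simp [hk, ho, ih (k / 2) (by omega)]

theorem natAbs_truncdiv_two (n : Int) : (PySem.Int.truncdiv n 2).natAbs = n.natAbs / 2 := by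
  simp [PySem.Int.truncdiv, Int.natAbs_tdiv]; rfl

theorem mod_two_ne_iff (n : Int) : PySem.Int.mod n 2 ≠ 0 ↔ n.natAbs % 2 = 1 := by
  have h : PySem.Int.mod n 2 = n % 2 := by simp
  rw [h]; omega

theorem how_odd_alt_eq (n : Int) : how_odd_alt n = (trailOnes n.natAbs : Int) := by
  unfold how_odd_alt
  by_cases h0 : n.natAbs = 0
  · rw [h0, trailOnes_even 0 (by omega)]; simp
  · have hsplit : List.takeWhile (· == '1') (binChars n.natAbs).reverse
        ++ List.dropWhile (· == '1') (binChars n.natAbs).reverse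
        = (binChars n.natAbs).reverse := List.takeWhile_append_dropWhile
    have hlen : (List.takeWhile (· == '1') (binChars n.natAbs).reverse).length
        + (List.dropWhile (· == '1') (binChars n.natAbs).reverse).length
        = (binChars n.natAbs).length := by
      have := congrArg List.length hsplit
      rwa [List.length_append, List.length_reverse] at this
    rw [binChars_reverse_takeWhile] at hlen
    simp only [h0, if_false, List.length_reverse]
    omega

theorem howOddLoop_eq : ∀ (m : Nat) (n x : Int), n.natAbs = m → PySem.Int.mod n 2 ≠ 0 →
    howOddLoop n x = x + (trailOnes n.natAbs : Int) := by
  intro m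
  induction m using Nat.strong_induction_on with
  | _ m ih =>
    intro n x hm h
    rw [howOddLoop]
    have hodd : n.natAbs % 2 = 1 := (mod_two_ne_iff n).mp h
    have habs : (PySem.Int.truncdiv n 2).natAbs = n.natAbs / 2 := natAbs_truncdiv_two n
    have hT : trailOnes n.natAbs = trailOnes (n.natAbs / 2) + 1 := trailOnes_odd _ hodd
    rw [if_pos h]
    by_cases h2 : PySem.Int.mod (PySem.Int.truncdiv n 2) 2 = 0
    · rw [if_pos h2]
      have he : (PySem.Int.truncdiv n 2).natAbs % 2 = 0 := by
        have := mod_two_ne_iff (PySem.Int.truncdiv n 2)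
        by_contra hc
        exact (this.mpr (by omega)) h2
      have hz : trailOnes (n.natAbs / 2) = 0 := by
        rw [← habs]; exact trailOnes_even _ he
      rw [hT, hz]; push_cast; ring
    · rw [if_neg h2]
      have := ih (PySem.Int.truncdiv n 2).natAbs (by omega) (PySem.Int.truncdiv n 2) (x + 1) rfl h2
      rw [this, habs, hT]; push_cast; ring

-- ===== VERDICT (by name: the statement is the Claim_ definition above) =====
theorem how_odd_spec : Claim_equal_how_odd := by
  intro n _
  unfold Spec_how_odd
  rw [how_odd_alt_eq]
  unfold how_odd
  by_cases h : PySem.Int.mod n 2 = 0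
  · rw [if_pos h]
    have he : n.natAbs % 2 = 0 := by
      have := mod_two_ne_iff n
      by_contra hc
      exact (this.mpr (by omega)) h
    rw [trailOnes_even _ he]; simp
  · rw [if_neg h, howOddLoop_eq n.natAbs n 0 rfl h]; simp
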